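-- pv_equiv track=rewrite | github.com/ochavarria/Proyectos-TEC | Progras/Python/Introduccion/Calendario.py | buscando_FyT2
-- ===== SOURCE A (Python) =====
-- def pertenece(lista,inp):
--     if(lista==[]):
--         return False
--     else:
--         if(lista[0]==inp):
--             return True
--         else:
--             return pertenece(lista[1:],inp)
--
-- def buscando_FyT2(lista,titulo,Fecha):
--     if(lista==[]):
--         return []
--     else:
--         if(pertenece(lista[0],titulo)and(pertenece(lista[0],Fecha))):
--             return lista[0] +list('   ')+ buscando_FyT2(lista[1:],titulo,Fecha)
--
--         else:
--             return buscando_FyT2(lista[1:],titulo,Fecha)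
-- ===== SOURCE B (Python) =====
-- def buscando_FyT2(lista, titulo, Fecha):
--     res = []
--     for sub in lista:
--         if titulo in sub and Fecha in sub:
--             res += sub + list('   ')
--     return res
-- ===== Notes on version B (the rewrite author's own statement) =====
-- stated objective: simpler
-- what changed: Replaces the two recursive helpers (recursive membership test and recursive concatenation over list slices) with a single iterative loop accumulating into a result list and using the built-in 'in' membership test; avoiding the repeated slicing/concatenation makes it faster in practice.
import Mathlib
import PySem

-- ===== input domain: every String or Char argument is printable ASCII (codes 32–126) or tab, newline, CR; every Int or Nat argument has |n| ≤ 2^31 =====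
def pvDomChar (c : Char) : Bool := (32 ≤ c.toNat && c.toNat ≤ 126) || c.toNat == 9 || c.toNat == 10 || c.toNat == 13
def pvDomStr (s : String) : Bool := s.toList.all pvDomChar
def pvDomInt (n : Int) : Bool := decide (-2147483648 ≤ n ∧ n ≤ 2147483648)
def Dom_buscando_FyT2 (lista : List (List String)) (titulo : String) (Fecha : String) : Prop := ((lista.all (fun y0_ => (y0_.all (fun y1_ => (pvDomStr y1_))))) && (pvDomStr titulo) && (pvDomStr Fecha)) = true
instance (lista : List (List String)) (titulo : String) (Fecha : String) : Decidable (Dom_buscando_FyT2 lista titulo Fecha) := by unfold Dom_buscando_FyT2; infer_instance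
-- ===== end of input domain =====

-- B replaces A's two recursive helpers with one iterative accumulator loop using built-in membership (objective: simpler).
-- ===== PORT A =====
def pertenece (lista : List String) (inp : String) : Bool :=
  match lista with
  | [] => false
  | x :: rest => if x = inp then true else pertenece rest inp

def buscando_FyT2 (lista : List (List String)) (titulo : String) (Fecha : String) : List String :=
  match lista with
  | [] => []
  | sub :: rest =>
    if pertenece sub titulo && pertenece sub Fecha then
      sub ++ [" ", " ", " "] ++ buscando_FyT2 rest titulo Fecha
    else
      buscando_FyT2 rest titulo Fecha

-- ===== PORT B =====
def buscando_FyT2_alt (lista : List (List String)) (titulo : String) (Fecha : String) : List String :=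
  lista.foldl (fun res sub =>
    if sub.contains titulo && sub.contains Fecha then res ++ sub ++ [" ", " ", " "] else res) []

-- ===== PRECONDITION & SPEC =====
def Spec_buscando_FyT2 (lista : List (List String)) (titulo : String) (Fecha : String) (out : List String) : Prop := out = buscando_FyT2_alt lista titulo Fecha
instance (lista : List (List String)) (titulo : String) (Fecha : String) (out : List String) : Decidable (Spec_buscando_FyT2 lista titulo Fecha out) := by unfold Spec_buscando_FyT2; infer_instance

-- ===== CLAIM (what is proved, stated in full; the proofs are below) =====
def Claim_equal_buscando_FyT2 : Prop := ∀ (lista : List (List String)) (titulo : String) (Fecha : String), Dom_buscando_FyT2 lista titulo Fecha → Spec_buscando_FyT2 lista titulo Fecha (buscando_FyT2 lista titulo Fecha)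

-- ===== LEMMAS AND PROOFS =====

-- ===== VERDICT (by name: the statement is the Claim_ definition above) =====
lemma pertenece_eq_contains (l : List String) (x : String) : pertenece l x = l.contains x := by
  induction l with
  | nil => simp [pertenece]
  | cons a t ih =>
    simp only [pertenece, ih, List.contains_cons]
    by_cases h : a = x
    · subst h; simp
    · simp [h, Ne.symm h]

lemma alt_acc (lista : List (List String)) (titulo Fecha : String) (acc : List String) :
    lista.foldl (fun res sub =>
      if sub.contains titulo && sub.contains Fecha then res ++ sub ++ [" ", " ", " "] else res) acc
    = acc ++ buscando_FyT2 lista titulo Fecha := by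
  induction lista generalizing acc with
  | nil => simp [buscando_FyT2]
  | cons sub rest ih =>
    simp only [List.foldl_cons, buscando_FyT2, pertenece_eq_contains]
    by_cases h : (sub.contains titulo && sub.contains Fecha) = true
    · rw [if_pos h, if_pos h, ih]; simp
    · rw [if_neg h, if_neg h, ih]

theorem buscando_FyT2_spec : Claim_equal_buscando_FyT2 := by
  intro lista titulo Fecha _
  unfold Spec_buscando_FyT2 buscando_FyT2_alt
  rw [alt_acc]
  simp
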